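-- pv_equiv track=rewrite | github.com/ggiokkll/CAR-Rec | code/utils.py | data_augment
-- ===== SOURCE A (Python) =====
-- def parse_item_codebook(item_cb_str):
--     if not isinstance(item_cb_str, str): return []
--     parts = item_cb_str.strip().split('item_')
--     items = ["item_" + part.strip() for part in parts if part.strip()]
--     return items
--
-- def data_augment(id_list, codebook_id_list, shred=2, item_limit=20):
--     num = len(id_list)
--     samples = []
--     codebook_samples = []
--
--     for n in range(num):
--         ids = id_list[n].strip('\n').split(" ")
--         user_id = ids[0]
--         item_id = ids[1:]
--
--         # [FIX] 通过 List 索引访问，非 Dict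
--         user_codebook_id = codebook_id_list[n][0]
--
--         # [FIX] 使用 parse_item_codebook 正确切分物品
--         item_cb_str = str(codebook_id_list[n][1]).strip('\n')
--         item_codebook_list = parse_item_codebook(item_cb_str)
--
--         loop_len = min(len(item_id), len(item_codebook_list))
--
--         temp_sample = []
--         temp_item_cb = []
--
--         temp_sample.append(user_id)
--
--         for k in range(loop_len):
--             if k > item_limit:
--                 break
--             temp_sample.append(item_id[k])
--             temp_item_cb.append(item_codebook_list[k])
--
--             if k > shred:
--                 sample = " ".join(temp_sample)
--                 item_seq_str = " ".join(temp_item_cb)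
--                 samples.append(sample)
--                 codebook_samples.append([user_codebook_id, item_seq_str])
--
--     return samples, codebook_samples
-- ===== SOURCE B (Python) =====
-- def parse_item_codebook(item_cb_str):
--     if not isinstance(item_cb_str, str): return []
--     parts = item_cb_str.strip().split('item_')
--     items = ["item_" + part.strip() for part in parts if part.strip()]
--     return items
--
-- def data_augment(id_list, codebook_id_list, shred=2, item_limit=20):
--     samples = []
--     codebook_samples = []
--     for row, cb_row in zip(id_list, codebook_id_list):
--         ids = row.strip('\n').split(" ")
--         user_id = ids[0]
--         item_id = ids[1:]
--         user_codebook_id = cb_row[0]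
--         item_codebook_list = parse_item_codebook(str(cb_row[1]).strip('\n'))
--         loop_len = min(len(item_id), len(item_codebook_list))
--         ks = range(max(shred + 1, 0), min(loop_len, item_limit + 1))
--         samples.extend(" ".join([user_id] + item_id[:k + 1]) for k in ks)
--         codebook_samples.extend([user_codebook_id, " ".join(item_codebook_list[:k + 1])] for k in ks)
--     return samples, codebook_samples
-- ===== Notes on version B (the rewrite author's own statement) =====
-- stated objective: simpler
-- what changed: B removes A's temp_sample/temp_item_cb accumulators, the per-step break and the emit guard: it computes the emitted positions arithmetically as range(max(shred+1,0), min(loop_len, item_limit+1)) and builds each sample directly from a prefix slice, iterating rows with zip instead of indexing.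
import Mathlib
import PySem

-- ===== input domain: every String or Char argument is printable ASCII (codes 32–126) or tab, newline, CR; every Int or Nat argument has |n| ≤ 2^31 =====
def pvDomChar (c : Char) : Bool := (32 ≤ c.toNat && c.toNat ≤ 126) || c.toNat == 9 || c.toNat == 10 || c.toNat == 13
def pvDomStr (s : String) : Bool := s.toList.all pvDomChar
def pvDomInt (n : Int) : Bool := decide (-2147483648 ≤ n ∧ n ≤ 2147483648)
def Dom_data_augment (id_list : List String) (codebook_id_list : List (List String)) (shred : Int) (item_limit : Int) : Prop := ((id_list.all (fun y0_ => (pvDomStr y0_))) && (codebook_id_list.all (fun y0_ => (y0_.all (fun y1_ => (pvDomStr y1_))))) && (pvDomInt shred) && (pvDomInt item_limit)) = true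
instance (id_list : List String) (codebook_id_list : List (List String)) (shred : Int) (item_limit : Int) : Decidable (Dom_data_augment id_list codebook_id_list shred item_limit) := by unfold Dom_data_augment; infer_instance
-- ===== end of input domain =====

-- B drops A's temp_sample/temp_item_cb accumulators and break: the emitted positions are computed
-- arithmetically as range(max(shred+1,0), min(loop_len, item_limit+1)) and each sample is built
-- directly from a prefix slice; objective: simpler (no mutable temps, no break, no per-step guard).
-- Equivalence is about the RETURN value; neither program mutates its arguments.

-- ===== PORT A =====
-- shared helper: parse_item_codebook (identical in Source A and Source B; the isinstance(str) branch is
-- always taken under the type convention, so only the str path is ported)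
def pvParseItemCodebook (s : String) : List String :=
  let parts := (PySem.Str.split? (PySem.Str.strip s) "item_").getD []  -- sep "item_" ≠ "", so split? is always some
  parts.filterMap (fun p =>
    let t := PySem.Str.strip p
    if t = "" then none else some ("item_" ++ t))

-- A's inner 'for k in range(loop_len)' loop with its break and temp accumulators
def pvAInner (shred item_limit : Int) (user_codebook_id : String)
    (item_id item_cb : List String) (ks : List Int)
    (temp_sample temp_item_cb : List String)
    (samples : List String) (cbs : List (List String)) : List String × List (List String) :=
  match ks with
  | [] => (samples, cbs)
  | k :: rest =>
    if item_limit < k then (samples, cbs)  -- 'if k > item_limit: break'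
    else
      let ts := temp_sample ++ [PySem.List.pyGetD item_id k ""]
      let tc := temp_item_cb ++ [PySem.List.pyGetD item_cb k ""]
      if shred < k then
        pvAInner shred item_limit user_codebook_id item_id item_cb rest ts tc
          (samples ++ [PySem.Str.join " " ts])
          (cbs ++ [[user_codebook_id, PySem.Str.join " " tc]])
      else
        pvAInner shred item_limit user_codebook_id item_id item_cb rest ts tc samples cbs

def data_augment (id_list : List String) (codebook_id_list : List (List String)) (shred : Int) (item_limit : Int) : List String × List (List String) :=
  let num : Int := id_list.length
  (PySem.List.pyRange 0 num 1).foldl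
    (fun (acc : List String × List (List String)) n =>
      let ids := (PySem.Str.split? (PySem.Str.stripChars (PySem.List.pyGetD id_list n "") "\n") " ").getD []
      let user_id := PySem.List.pyGetD ids 0 ""
      let item_id := PySem.List.slice ids (some 1) none
      let row := PySem.List.pyGetD codebook_id_list n []   -- codebook_id_list[n]; in range under Pre_
      let user_codebook_id := PySem.List.pyGetD row 0 ""   -- row[0]; in range under Pre_
      let item_cb_str := PySem.Str.stripChars (PySem.List.pyGetD row 1 "") "\n"  -- row[1]; under Pre_
      let item_codebook_list := pvParseItemCodebook item_cb_str
      let loop_len : Int := min (item_id.length : Int) (item_codebook_list.length : Int)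
      pvAInner shred item_limit user_codebook_id item_id item_codebook_list
        (PySem.List.pyRange 0 loop_len 1) [user_id] [] acc.1 acc.2)
    ([], [])

-- ===== PORT B =====
def data_augment_alt (id_list : List String) (codebook_id_list : List (List String)) (shred : Int) (item_limit : Int) : List String × List (List String) :=
  (id_list.zip codebook_id_list).foldl
    (fun (acc : List String × List (List String)) rc =>
      let ids := (PySem.Str.split? (PySem.Str.stripChars rc.1 "\n") " ").getD []
      let user_id := PySem.List.pyGetD ids 0 ""
      let item_id := PySem.List.slice ids (some 1) none
      let user_codebook_id := PySem.List.pyGetD rc.2 0 ""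
      let item_codebook_list := pvParseItemCodebook (PySem.Str.stripChars (PySem.List.pyGetD rc.2 1 "") "\n")
      let loop_len : Int := min (item_id.length : Int) (item_codebook_list.length : Int)
      let ks := PySem.List.pyRange (max (shred + 1) 0) (min loop_len (item_limit + 1)) 1
      (acc.1 ++ ks.map (fun k =>
          PySem.Str.join " " (user_id :: PySem.List.slice item_id none (some (k + 1)))),
       acc.2 ++ ks.map (fun k =>
          [user_codebook_id, PySem.Str.join " " (PySem.List.slice item_codebook_list none (some (k + 1)))])))
    ([], [])

-- ===== PRECONDITION & SPEC =====
-- Pre_ excludes exactly the inputs where A raises IndexError: codebook_id_list must cover every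
-- row of id_list and each used codebook row needs at least 2 entries.
def Pre_data_augment (id_list : List String) (codebook_id_list : List (List String)) (shred : Int) (item_limit : Int) : Prop :=
  id_list.length ≤ codebook_id_list.length ∧
  ∀ row ∈ codebook_id_list.take id_list.length, 2 ≤ row.length
instance (id_list : List String) (codebook_id_list : List (List String)) (shred : Int) (item_limit : Int) : Decidable (Pre_data_augment id_list codebook_id_list shred item_limit) := by unfold Pre_data_augment; infer_instance

def pvWitness_data_augment : List String × List (List String) × Int × Int :=
  (["u1 i1 i2 i3 i4 i5"], [["cb_u", "item_1 item_2 item_3 item_4 item_5"]], 2, 20)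

def Spec_data_augment (id_list : List String) (codebook_id_list : List (List String)) (shred : Int) (item_limit : Int) (out : List String × List (List String)) : Prop := out = data_augment_alt id_list codebook_id_list shred item_limit
instance (id_list : List String) (codebook_id_list : List (List String)) (shred : Int) (item_limit : Int) (out : List String × List (List String)) : Decidable (Spec_data_augment id_list codebook_id_list shred item_limit out) := by unfold Spec_data_augment; infer_instance

-- ===== CLAIM (what is proved, stated in full; the proofs are below) =====
def Claim_equal_data_augment : Prop := ∀ (id_list : List String) (codebook_id_list : List (List String)) (shred : Int) (item_limit : Int), Dom_data_augment id_list codebook_id_list shred item_limit → Pre_data_augment id_list codebook_id_list shred item_limit → Spec_data_augment id_list codebook_id_list shred item_limit (data_augment id_list codebook_id_list shred item_limit)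
-- ===== LEMMAS AND PROOFS =====

-- per-row emitted samples (take form), shared shape of both sides' row output
def pvRowS (shred item_limit : Int) (idrow : String) (cbrow : List String) : List String :=
  let ids := (PySem.Str.split? (PySem.Str.stripChars idrow "\n") " ").getD []
  let user_id := PySem.List.pyGetD ids 0 ""
  let item_id := PySem.List.slice ids (some 1) none
  let item_cb := pvParseItemCodebook (PySem.Str.stripChars (PySem.List.pyGetD cbrow 1 "") "\n")
  (PySem.List.pyRange (max (shred + 1) 0) (min (min (item_id.length : Int) (item_cb.length : Int)) (item_limit + 1)) 1).map
    (fun k => PySem.Str.join " " (user_id :: item_id.take (k + 1).toNat))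

-- per-row emitted codebook rows
def pvRowC (shred item_limit : Int) (idrow : String) (cbrow : List String) : List (List String) :=
  let ids := (PySem.Str.split? (PySem.Str.stripChars idrow "\n") " ").getD []
  let item_id := PySem.List.slice ids (some 1) none
  let item_cb := pvParseItemCodebook (PySem.Str.stripChars (PySem.List.pyGetD cbrow 1 "") "\n")
  (PySem.List.pyRange (max (shred + 1) 0) (min (min (item_id.length : Int) (item_cb.length : Int)) (item_limit + 1)) 1).map
    (fun k => [PySem.List.pyGetD cbrow 0 "", PySem.Str.join " " (item_cb.take (k + 1).toNat)])

-- A's inner loop, started at position j with temps holding the length-j prefixes, emits exactly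
-- the samples for k in [max(shred+1, j), min(L, item_limit+1)).
theorem pvAInner_spec (shred item_limit : Int) (ucb user_id : String)
    (item_id item_cb : List String) (L : Nat)
    (hL1 : L ≤ item_id.length) (hL2 : L ≤ item_cb.length) :
    ∀ (j : Nat), j ≤ L → ∀ (s : List String) (c : List (List String)),
    pvAInner shred item_limit ucb item_id item_cb
      (PySem.List.pyRange (j : Int) (L : Int) 1)
      (user_id :: item_id.take j) (item_cb.take j) s c
    = (s ++ (PySem.List.pyRange (max (shred + 1) (j : Int)) (min (L : Int) (item_limit + 1)) 1).map
          (fun k => PySem.Str.join " " (user_id :: item_id.take (k + 1).toNat)),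
       c ++ (PySem.List.pyRange (max (shred + 1) (j : Int)) (min (L : Int) (item_limit + 1)) 1).map
          (fun k => [ucb, PySem.Str.join " " (item_cb.take (k + 1).toNat)])) := by
  suffices H : ∀ (fuel j : Nat), L - j = fuel → j ≤ L → ∀ (s : List String) (c : List (List String)),
      pvAInner shred item_limit ucb item_id item_cb
        (PySem.List.pyRange (j : Int) (L : Int) 1)
        (user_id :: item_id.take j) (item_cb.take j) s c
      = (s ++ (PySem.List.pyRange (max (shred + 1) (j : Int)) (min (L : Int) (item_limit + 1)) 1).map
            (fun k => PySem.Str.join " " (user_id :: item_id.take (k + 1).toNat)),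
         c ++ (PySem.List.pyRange (max (shred + 1) (j : Int)) (min (L : Int) (item_limit + 1)) 1).map
            (fun k => [ucb, PySem.Str.join " " (item_cb.take (k + 1).toNat)])) by
    exact fun j hj s c => H (L - j) j rfl hj s c
  intro fuel
  induction fuel with
  | zero =>
    intro j hfj hj s c
    have hjL : j = L := by omega
    subst hjL
    rw [PySem.List.pyRange_one_eq_nil (le_refl _),
        PySem.List.pyRange_one_eq_nil (by omega : min (j : Int) (item_limit + 1) ≤ max (shred + 1) (j : Int))]
    simp [pvAInner]
  | succ n ih =>
    intro j hfj hj s c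
    have hjL : j < L := by omega
    have hjLi : (j : Int) < (L : Int) := by exact_mod_cast hjL
    rw [PySem.List.pyRange_one_cons hjLi]
    have hts : item_id.take j ++ [PySem.List.pyGetD item_id (j : Int) ""] = item_id.take (j + 1) := by
      have hjlen : j < item_id.length := by omega
      rw [PySem.List.pyGetD_natCast, List.take_add_one]
      simp [List.getD_eq_getElem?_getD, hjlen]
    have htc : item_cb.take j ++ [PySem.List.pyGetD item_cb (j : Int) ""] = item_cb.take (j + 1) := by
      have hjlen : j < item_cb.length := by omega
      rw [PySem.List.pyGetD_natCast, List.take_add_one]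
      simp [List.getD_eq_getElem?_getD, hjlen]
    have hcast : ((j : Int) + 1) = ((j + 1 : Nat) : Int) := by push_cast; ring
    have htoNat : ((j : Int) + 1).toNat = j + 1 := by omega
    by_cases hil : item_limit < (j : Int)
    · simp only [pvAInner, if_pos hil]
      rw [PySem.List.pyRange_one_eq_nil
            (by omega : min (L : Int) (item_limit + 1) ≤ max (shred + 1) (j : Int))]
      simp
    · by_cases hsh : shred < (j : Int)
      · simp only [pvAInner, if_neg hil, if_pos hsh]
        have step := ih (j + 1) (by omega) (by omega)
          (s ++ [PySem.Str.join " " (user_id :: item_id.take (j + 1))])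
          (c ++ [[ucb, PySem.Str.join " " (item_cb.take (j + 1))]])
        rw [← hcast] at step
        have e1 : max (shred + 1) (j : Int) = (j : Int) := by omega
        have e2 : max (shred + 1) ((j : Int) + 1) = (j : Int) + 1 := by omega
        have hlt : (j : Int) < min (L : Int) (item_limit + 1) := by omega
        rw [show (user_id :: item_id.take j) ++ [PySem.List.pyGetD item_id (j : Int) ""]
              = user_id :: item_id.take (j + 1) by
            simpa using congrArg (user_id :: ·) hts,
          htc, step, e1, PySem.List.pyRange_one_cons hlt, e2]
        simp [htoNat]
      · simp only [pvAInner, if_neg hil, if_neg hsh]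
        have step := ih (j + 1) (by omega) (by omega) s c
        rw [← hcast] at step
        have e3 : max (shred + 1) (j : Int) = max (shred + 1) ((j : Int) + 1) := by omega
        rw [show (user_id :: item_id.take j) ++ [PySem.List.pyGetD item_id (j : Int) ""]
              = user_id :: item_id.take (j + 1) by
            simpa using congrArg (user_id :: ·) hts,
          htc, step, e3]

-- a fold whose step appends to both components concatenates
theorem pvFoldlPairAppend {α β γ : Type} (l : List α) (g : α → List β) (h : α → List γ) :
    ∀ (s : List β) (c : List γ),
    l.foldl (fun acc x => (acc.1 ++ g x, acc.2 ++ h x)) (s, c) = (s ++ l.flatMap g, c ++ l.flatMap h) := by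
  induction l with
  | nil => intro s c; simp
  | cons x xs ih => intro s c; simpa using ih (s ++ g x) (c ++ h x)

-- indexing the two lists over range(len(xs)) is folding over their zip (Nat form)
theorem pvIdxZipNat {β : Type} (f : String → List String → List β) :
    ∀ (xs : List String) (ys : List (List String)), xs.length ≤ ys.length →
    (List.range xs.length).flatMap (fun i => f (xs.getD i "") (ys.getD i [])) =
      (xs.zip ys).flatMap (fun p => f p.1 p.2) := by
  intro xs
  induction xs with
  | nil => intro ys h; simp
  | cons x xs ih =>
    intro ys h
    match ys with
    | [] => simp at h
    | y :: ys =>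
      simp only [List.length_cons, List.range_succ_eq_map, List.flatMap_cons, List.flatMap_map,
        List.getD_cons_zero, List.getD_cons_succ, List.zip_cons_cons]
      rw [ih ys (by simpa using h)]

-- indexing the two lists over pyRange(0, len(xs)) is folding over their zip
theorem pvIdxZip {β : Type} (f : String → List String → List β)
    (xs : List String) (ys : List (List String)) (h : xs.length ≤ ys.length) :
    (PySem.List.pyRange 0 (xs.length : Int) 1).flatMap
        (fun n => f (PySem.List.pyGetD xs n "") (PySem.List.pyGetD ys n [])) =
      (xs.zip ys).flatMap (fun p => f p.1 p.2) := by
  rw [show PySem.List.pyRange 0 (xs.length : Int) 1 = PySem.List.pyRange 0 (xs.length : Int) from rfl,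
    PySem.List.pyRange_zero_nat, List.flatMap_map]
  have := pvIdxZipNat f xs ys h
  simpa [PySem.List.pyGetD_natCast, Function.comp] using this

-- A's whole per-row computation emits exactly pvRowS / pvRowC
theorem pvARow (shred item_limit : Int) (idrow : String) (cbrow : List String)
    (s : List String) (c : List (List String)) :
    (let ids := (PySem.Str.split? (PySem.Str.stripChars idrow "\n") " ").getD []
     let user_id := PySem.List.pyGetD ids 0 ""
     let item_id := PySem.List.slice ids (some 1) none
     let item_cb := pvParseItemCodebook (PySem.Str.stripChars (PySem.List.pyGetD cbrow 1 "") "\n")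
     pvAInner shred item_limit (PySem.List.pyGetD cbrow 0 "") item_id item_cb
       (PySem.List.pyRange 0 (min (item_id.length : Int) (item_cb.length : Int)) 1) [user_id] [] s c)
    = (s ++ pvRowS shred item_limit idrow cbrow, c ++ pvRowC shred item_limit idrow cbrow) := by
  have h := pvAInner_spec shred item_limit
    (PySem.List.pyGetD cbrow 0 "")
    (PySem.List.pyGetD ((PySem.Str.split? (PySem.Str.stripChars idrow "\n") " ").getD []) 0 "")
    (PySem.List.slice ((PySem.Str.split? (PySem.Str.stripChars idrow "\n") " ").getD []) (some 1) none)
    (pvParseItemCodebook (PySem.Str.stripChars (PySem.List.pyGetD cbrow 1 "") "\n"))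
    (min (PySem.List.slice ((PySem.Str.split? (PySem.Str.stripChars idrow "\n") " ").getD []) (some 1) none).length
         (pvParseItemCodebook (PySem.Str.stripChars (PySem.List.pyGetD cbrow 1 "") "\n")).length)
    (Nat.min_le_left _ _) (Nat.min_le_right _ _) 0 (Nat.zero_le _) s c
  simp only [Nat.cast_zero, Nat.cast_min, List.take_zero] at h
  simp only [pvRowS, pvRowC]
  exact h

-- B's sample map in take form
theorem pvBRowS (shred item_limit : Int) (idrow : String) (cbrow : List String) :
    (let ids := (PySem.Str.split? (PySem.Str.stripChars idrow "\n") " ").getD []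
     let user_id := PySem.List.pyGetD ids 0 ""
     let item_id := PySem.List.slice ids (some 1) none
     let item_cb := pvParseItemCodebook (PySem.Str.stripChars (PySem.List.pyGetD cbrow 1 "") "\n")
     (PySem.List.pyRange (max (shred + 1) 0) (min (min (item_id.length : Int) (item_cb.length : Int)) (item_limit + 1)) 1).map
       (fun k => PySem.Str.join " " (user_id :: PySem.List.slice item_id none (some (k + 1)))))
    = pvRowS shred item_limit idrow cbrow := by
  simp only [pvRowS]
  apply List.map_congr_left
  intro k hk
  have hk0 : 0 ≤ k := by
    have := (PySem.List.mem_pyRange_one.mp hk).1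
    omega
  rw [PySem.List.slice_to _ (by omega : (0:Int) ≤ k + 1)]

-- B's codebook map in take form
theorem pvBRowC (shred item_limit : Int) (idrow : String) (cbrow : List String) :
    (let ids := (PySem.Str.split? (PySem.Str.stripChars idrow "\n") " ").getD []
     let item_id := PySem.List.slice ids (some 1) none
     let item_cb := pvParseItemCodebook (PySem.Str.stripChars (PySem.List.pyGetD cbrow 1 "") "\n")
     (PySem.List.pyRange (max (shred + 1) 0) (min (min (item_id.length : Int) (item_cb.length : Int)) (item_limit + 1)) 1).map
       (fun k => [PySem.List.pyGetD cbrow 0 "", PySem.Str.join " " (PySem.List.slice item_cb none (some (k + 1)))]))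
    = pvRowC shred item_limit idrow cbrow := by
  simp only [pvRowC]
  apply List.map_congr_left
  intro k hk
  have hk0 : 0 ≤ k := by
    have := (PySem.List.mem_pyRange_one.mp hk).1
    omega
  rw [PySem.List.slice_to _ (by omega : (0:Int) ≤ k + 1)]

-- ===== VERDICT (by name: the statement is the Claim_ definition above) =====
theorem data_augment_spec : Claim_equal_data_augment := by
  intro id_list codebook_id_list shred item_limit _ hpre
  unfold Spec_data_augment data_augment data_augment_alt
  simp only [pvARow, pvBRowS, pvBRowC]
  rw [pvFoldlPairAppend, pvFoldlPairAppend,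
    pvIdxZip (fun a b => pvRowS shred item_limit a b) id_list codebook_id_list hpre.1,
    pvIdxZip (fun a b => pvRowC shred item_limit a b) id_list codebook_id_list hpre.1]
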